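-- pv_equiv track=rewrite | github.com/CorwynRavenwing/classes | python/hackerrank/euler/euler_54.py | card_count
-- ===== SOURCE A (Python) =====
-- def card_value_index(x):
--     CVO = 'AKQJT98765432:CHSD'
--     return CVO.index(x)
--
-- def by_card_value(x):
--     return card_value_index(x)
--
-- def by_card_count_then_value(T):
--     count, value = T
--     return (-count, card_value_index(value))
--
-- def card_values(C):
--     return sorted([
--         card[0]
--         for card in C
--     ], key=by_card_value)
--
-- def card_count(C):
--     values = card_values(C)
--     different_values = set(values)
--     counts = [
--         (len([match for match in values if match == v]), v)
--         for v in different_values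
--     ]
--     counts = [
--         (count, value)
--         for (count, value) in counts
--         if count > 1
--     ]
--     return sorted(
--         counts,
--         key=by_card_count_then_value
--     )
-- ===== SOURCE B (Python) =====
-- def card_value_index(x):
--     CVO = 'AKQJT98765432:CHSD'
--     return CVO.index(x)
--
-- def by_card_value(x):
--     return card_value_index(x)
--
-- def by_card_count_then_value(T):
--     count, value = T
--     return (-count, card_value_index(value))
--
-- def card_count(C):
--     values = sorted([card[0] for card in C], key=by_card_value)
--     runs = []
--     i = 0
--     n = len(values)
--     while i < n:
--         j = i + 1
--         while j < n and values[j] == values[i]: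
--             j += 1
--         if j - i > 1:
--             runs.append((j - i, values[i]))
--         i = j
--     return sorted(runs, key=by_card_count_then_value)
-- ===== Notes on version B (the rewrite author's own statement) =====
-- stated objective: alternative
-- what changed: B replaces A's set()-of-values plus a full list rescan per distinct value by a single run-length pass (nested while loops, groupby-style) over the already-sorted values, keeping the identical final sort.
import Mathlib
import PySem

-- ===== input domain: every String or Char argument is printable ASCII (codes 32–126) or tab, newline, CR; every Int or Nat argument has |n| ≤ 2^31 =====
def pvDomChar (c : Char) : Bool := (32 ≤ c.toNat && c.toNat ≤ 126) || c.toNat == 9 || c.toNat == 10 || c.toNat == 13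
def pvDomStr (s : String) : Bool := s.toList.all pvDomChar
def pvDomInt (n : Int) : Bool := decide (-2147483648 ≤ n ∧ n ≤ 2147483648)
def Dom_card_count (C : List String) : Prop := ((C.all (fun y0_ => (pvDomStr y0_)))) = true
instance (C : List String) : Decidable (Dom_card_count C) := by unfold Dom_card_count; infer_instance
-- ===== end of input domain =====

-- B replaces A's per-distinct-value rescan (set() + a full list scan per value) by a single
-- run-length pass over the already-sorted values; same final sort, same results (alternative decomposition).


-- ===== PORT A =====
-- Python 1-character strings (the card values card[0]) are represented as Char while the
-- computation runs; both ports wrap them back into String in a final map over the result.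
def pvCVO : List Char := ['A','K','Q','J','T','9','8','7','6','5','4','3','2',':','C','H','S','D']

-- CVO.index(x); Python raises ValueError when x ∉ CVO — Pre_ excludes that, the getD default is never reached there
def card_value_index (x : Char) : Int := ((PySem.List.index? pvCVO x).getD 18 : Int)

def card_values (C : List String) : List Char :=
  PySem.List.sorted (C.map (fun card => (PySem.Str.pyGet? card 0).getD ' ')) (fun x => card_value_index x) false

def card_count (C : List String) : List (Int × String) :=
  let values := card_values C
  let different_values := PySem.Set.ofList values
  let counts := different_values.map (fun v => (((values.filter (fun m => m == v)).length : Int), v))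
  let counts2 := counts.filter (fun t => decide (1 < t.1))
  (PySem.List.sorted2 counts2 (fun t => -t.1) (fun t => card_value_index t.2) false).map
    (fun t => (t.1, String.ofList [t.2]))

-- ===== PORT B =====
-- the two nested while loops of Source B: one run (takeWhile / dropWhile) per distinct value of the sorted list
def pvRuns : List Char → List (Int × Char)
  | [] => []
  | c :: rest =>
    ((1 + (rest.takeWhile (fun x => x == c)).length : Int), c) ::
      pvRuns (rest.dropWhile (fun x => x == c))
termination_by V => V.length
decreasing_by
  simpa using Nat.lt_succ_of_le ((rest.dropWhile_sublist (fun x => x == c)).length_le)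

def card_count_alt (C : List String) : List (Int × String) :=
  let values := PySem.List.sorted (C.map (fun card => (PySem.Str.pyGet? card 0).getD ' '))
                  (fun x => card_value_index x) false
  let runs := (pvRuns values).filter (fun t => decide (1 < t.1))
  (PySem.List.sorted2 runs (fun t => -t.1) (fun t => card_value_index t.2) false).map
    (fun t => (t.1, String.ofList [t.2]))

-- ===== PRECONDITION & SPEC =====
-- Pre_ = exactly A's non-raising domain: card[0] raises IndexError on an empty string and
-- CVO.index raises ValueError on a first character outside CVO.
def Pre_card_count (C : List String) : Prop :=
  ∀ s ∈ C, s.toList ≠ [] ∧ s.toList.headD ' ' ∈ pvCVO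
instance (C : List String) : Decidable (Pre_card_count C) := by unfold Pre_card_count; infer_instance
def pvWitness_card_count : List String := ["AH", "AD", "3C"]

def Spec_card_count (C : List String) (out : List (Int × String)) : Prop := out = card_count_alt C
instance (C : List String) (out : List (Int × String)) : Decidable (Spec_card_count C out) := by
  unfold Spec_card_count; infer_instance

-- ===== CLAIM (what is proved, stated in full; the proofs are below) =====
def Claim_equal_card_count : Prop :=
  ∀ (C : List String), Dom_card_count C → Pre_card_count C → Spec_card_count C (card_count C)

-- ===== LEMMAS AND PROOFS =====

-- CVO.index is injective on characters that occur in CVO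
theorem card_value_index_inj {a b : Char} (ha : a ∈ pvCVO) (hb : b ∈ pvCVO)
    (h : card_value_index a = card_value_index b) : a = b := by
  obtain ⟨ka, hka⟩ := (PySem.List.index?_isSome_iff pvCVO a).2 ha |> Option.isSome_iff_exists.1
  obtain ⟨kb, hkb⟩ := (PySem.List.index?_isSome_iff pvCVO b).2 hb |> Option.isSome_iff_exists.1
  obtain ⟨hlta, hga, -⟩ := PySem.List.getElem_of_index?_eq_some hka
  obtain ⟨hltb, hgb, -⟩ := PySem.List.getElem_of_index?_eq_some hkb
  unfold card_value_index at h
  rw [hka, hkb] at h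
  simp at h
  subst h
  rw [← hga, ← hgb]

-- folding Set.add over elements that all differ from the head keeps the head in front
theorem foldl_add_cons {α : Type} [BEq α] [LawfulBEq α] (d : List α) (c : α) (s : List α)
    (hc : c ∉ d) :
    List.foldl PySem.Set.add (c :: s) d = c :: List.foldl PySem.Set.add s d := by
  induction d generalizing s with
  | nil => rfl
  | cons x xs ih =>
    simp only [List.mem_cons, not_or] at hc
    have hstep : PySem.Set.add (c :: s) x = c :: PySem.Set.add s x := by
      by_cases hm : x ∈ s
      · simp [PySem.Set.add, hm, Ne.symm hc.1]
      · simp [PySem.Set.add, hm, Ne.symm hc.1]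
    simp only [List.foldl_cons, hstep, ih _ hc.2]

-- folding Set.add over copies of the element already present changes nothing
theorem foldl_add_all_eq {α : Type} [BEq α] [LawfulBEq α] (t : List α) (c : α)
    (ht : ∀ x ∈ t, x = c) : List.foldl PySem.Set.add [c] t = [c] := by
  induction t with
  | nil => rfl
  | cons x xs ih =>
    have hx := ht x (by simp)
    subst hx
    simp only [List.foldl_cons]
    have : PySem.Set.add [x] x = [x] := by simp [PySem.Set.add]
    rw [this, ih (fun y hy => ht y (by simp [hy]))]

-- on a key-sorted list of CVO characters, the run-length pass produces exactly
-- A's (count, value) pair for each distinct value, in first-occurrence order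
theorem runs_eq (V : List Char)
    (hpw : V.Pairwise (fun a b => card_value_index a ≤ card_value_index b))
    (hmem : ∀ c ∈ V, c ∈ pvCVO) :
    pvRuns V = (PySem.Set.ofList V).map (fun v => (((V.filter (fun m => m == v)).length : Int), v)) := by
  induction V using pvRuns.induct with
  | case1 => simp [pvRuns, PySem.Set.ofList, PySem.Set.empty]
  | case2 c rest ih =>
    set p : Char → Bool := fun x => x == c with hp
    set t := rest.takeWhile p with htdef
    set d := rest.dropWhile p with hddef
    have hrest : t ++ d = rest := List.takeWhile_append_dropWhile
    have ht : ∀ x ∈ t, x = c := fun x hx => by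
      have := List.mem_takeWhile_imp hx; simpa [hp] using this
    have hpwrest : rest.Pairwise (fun a b => card_value_index a ≤ card_value_index b) :=
      (List.pairwise_cons.1 hpw).2
    have hhead : ∀ x ∈ rest, card_value_index c ≤ card_value_index x :=
      (List.pairwise_cons.1 hpw).1
    have hdsub : d.Sublist rest := List.dropWhile_sublist p
    have hcd : c ∉ d := by
      cases hd : d with
      | nil => simp
      | cons b0 d' =>
        have hb0 : (p b0) = false := by
          have := List.head_dropWhile_not p (l := rest) (by rw [← hddef, hd]; simp)
          simpa [← hddef, hd] using this
        have hb0ne : b0 ≠ c := by simpa [hp] using hb0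
        intro hcmem
        rcases List.mem_cons.1 hcmem with h | h
        · exact hb0ne h.symm
        · have hpwd : (b0 :: d').Pairwise (fun a b => card_value_index a ≤ card_value_index b) := by
            rw [← hd]; exact hpwrest.sublist hdsub
          have h1 : card_value_index b0 ≤ card_value_index c :=
            (List.pairwise_cons.1 hpwd).1 c h
          have hb0rest : b0 ∈ rest := hdsub.mem (by rw [hd]; simp)
          have h2 : card_value_index c ≤ card_value_index b0 := hhead b0 hb0rest
          have hb0cvo : b0 ∈ pvCVO := hmem b0 (by simp [hb0rest])
          have hccvo : c ∈ pvCVO := hmem c (by simp)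
          exact hb0ne (card_value_index_inj hb0cvo hccvo (le_antisymm h1 h2))
    have hxd_ne : ∀ x ∈ d, (x == c) = false := fun x hx => by
      simp only [beq_eq_false_iff_ne]; intro h; exact hcd (h ▸ hx)
    have hset : PySem.Set.ofList (c :: rest) = c :: PySem.Set.ofList d := by
      show List.foldl PySem.Set.add PySem.Set.empty (c :: rest) = _
      rw [← hrest]
      have hadd0 : PySem.Set.add PySem.Set.empty c = [c] := by simp [PySem.Set.add, PySem.Set.empty]
      simp only [List.foldl_cons, List.foldl_append, hadd0]
      rw [foldl_add_all_eq t c ht]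
      exact foldl_add_cons d c [] hcd
    have hcount_c : ((c :: rest).filter (fun m => m == c)).length = 1 + t.length := by
      rw [← hrest]
      have h1 : t.filter (fun m => m == c) = t :=
        List.filter_eq_self.2 (fun x hx => by simp [ht x hx])
      have h2 : d.filter (fun m => m == c) = [] :=
        List.filter_eq_nil_iff.2 (fun x hx => by simp [hxd_ne x hx])
      simp [List.filter_append, h1, h2]
      omega
    have hcount_d : ∀ v ∈ d, ((c :: rest).filter (fun m => m == v)).length
        = (d.filter (fun m => m == v)).length := by
      intro v hv
      have hvne : (c == v) = false := by
        simp only [beq_eq_false_iff_ne]; intro h; exact hcd (h ▸ hv)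
      have h1 : t.filter (fun m => m == v) = [] :=
        List.filter_eq_nil_iff.2 (fun x hx => by rw [ht x hx]; simp [hvne])
      rw [← hrest]
      simp [List.filter_append, hvne, h1]
    have hdmem : ∀ x ∈ d, x ∈ pvCVO := fun x hx => hmem x (by simp [hdsub.mem hx])
    have hdpw : d.Pairwise (fun a b => card_value_index a ≤ card_value_index b) :=
      hpwrest.sublist hdsub
    rw [pvRuns, hset]
    simp only [List.map_cons]
    congr 1
    · rw [hcount_c]; push_cast; rw [htdef, hp]
    · rw [ih hdpw hdmem]
      apply List.map_congr_left
      intro v hv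
      have hvd : v ∈ d := (PySem.Set.mem_ofList d v).1 hv
      simp [hcount_d v hvd]

-- every element of the sorted first-letter list lies in CVO (under Pre_)
theorem card_values_mem (C : List String) (hpre : Pre_card_count C) :
    ∀ c ∈ card_values C, c ∈ pvCVO := by
  intro c hc
  rw [card_values, PySem.List.mem_sorted] at hc
  simp only [List.mem_map] at hc
  obtain ⟨s, hs, hcs⟩ := hc
  obtain ⟨hne, hmem'⟩ := hpre s hs
  obtain ⟨c0, t0, hst⟩ := List.exists_cons_of_ne_nil hne
  have hget : (PySem.Str.pyGet? s 0).getD ' ' = c0 := by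
    simp [PySem.Str.pyGet?, PySem.List.pyGet?, PySem.List.pyIdx?, hst]
  rw [hget] at hcs
  rw [hst] at hmem'
  simpa [← hcs] using hmem'

-- ===== VERDICT (by name: the statement is the Claim_ definition above) =====
theorem card_count_spec : Claim_equal_card_count := by
  intro C hdom hpre
  unfold Spec_card_count
  show card_count C = card_count_alt C
  unfold card_count card_count_alt
  rw [show PySem.List.sorted (C.map (fun card => (PySem.Str.pyGet? card 0).getD ' '))
        (fun x => card_value_index x) false = card_values C from rfl]
  have hpw : (card_values C).Pairwise (fun a b => card_value_index a ≤ card_value_index b) := by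
    rw [card_values]
    exact PySem.List.sorted_pairwise _ _
  simp only [runs_eq (card_values C) hpw (card_values_mem C hpre)]
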